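-- pv_equiv track=rewrite | github.com/bjnoel/dale | tools/scrapers/build_nursery_compare.py | count_species
-- ===== SOURCE A (Python) =====
-- def count_species(products: list, species_lookup: dict) -> int:
--     """Count distinct species in a nursery's product list."""
--     found = set()
--     for p in products:
--         title = p.get("title", "").lower()
--         for term, entry in species_lookup.items():
--             if term and term in title:
--                 found.add(entry["cn"])
--                 break
--     return len(found)
-- ===== SOURCE B (Python) =====
-- def count_species(products: list, species_lookup: dict) -> int:
--     """Count distinct species in a nursery's product list.
--
--     Term-major pass: instead of scanning all terms per product, walk the
--     species terms once in dict order, eliminating every still-unmatched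
--     title a term hits; a term that hits anything is by construction the
--     first matching term of each title it removes.
--     """
--     remaining = [p.get("title", "").lower() for p in products]
--     found = set()
--     for term, entry in species_lookup.items():
--         if not term:
--             continue
--         still = [t for t in remaining if term not in t]
--         if len(still) != len(remaining):
--             found.add(entry["cn"])
--         remaining = still
--     return len(found)
-- ===== Notes on version B (the rewrite author's own statement) =====
-- stated objective: alternative
-- what changed: Replaces A's product-major scan (for each product, scan all species terms until the first hit, collecting common names in a set) by a term-major single pass over the species dict that filters out already-matched titles, adding a term's common name exactly when it eliminates some still-unmatched title; a term that hits a remaining title is by construction that title's first matching term, so the same distinct common names are collected.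
-- outside the precondition, e.g. on count_species([{'title': 'oak'}], {'oak': {'cn': 'Oak'}, 'ak': {}}): A returns 1, B returns 1
import Mathlib
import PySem

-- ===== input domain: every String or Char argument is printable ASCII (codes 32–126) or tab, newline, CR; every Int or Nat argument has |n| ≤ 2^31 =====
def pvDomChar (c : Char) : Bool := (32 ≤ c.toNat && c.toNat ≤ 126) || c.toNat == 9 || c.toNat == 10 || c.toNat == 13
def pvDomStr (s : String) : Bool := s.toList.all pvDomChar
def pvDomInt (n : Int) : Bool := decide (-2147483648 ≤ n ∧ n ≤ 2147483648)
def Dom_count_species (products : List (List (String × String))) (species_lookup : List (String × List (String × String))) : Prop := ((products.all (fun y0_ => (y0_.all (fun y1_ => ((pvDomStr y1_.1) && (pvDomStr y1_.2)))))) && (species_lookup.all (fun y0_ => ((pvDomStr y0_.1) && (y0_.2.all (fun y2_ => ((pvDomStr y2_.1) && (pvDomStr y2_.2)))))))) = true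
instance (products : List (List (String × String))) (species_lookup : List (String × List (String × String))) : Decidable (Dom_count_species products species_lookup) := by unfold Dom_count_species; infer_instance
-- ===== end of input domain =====

-- B replaces A's product-major scan (for each product, scan all terms until the first hit)
-- by a term-major scan that eliminates already-matched titles; objective: alternative (same
-- asymptotic cost, genuinely different traversal). Equivalence is about the return value.

-- ===== PORT A =====
-- inner 'for term, entry in species_lookup.items(): … break' loop; none = KeyError on entry["cn"]
def csA_inner (items : List (String × List (String × String))) (title : String)
    (found : PySem.Set String) : Option (PySem.Set String) :=
  match items with
  | [] => some found
  | (term, entry) :: rest =>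
    if !(term == "") && PySem.Str.isIn term title then
      match (PySem.Dict.ofList entry).get? "cn" with
      | some cn => some (PySem.Set.add found cn)
      | none => none
    else csA_inner rest title found

-- outer 'for p in products' loop
def csA_loop (products : List (List (String × String)))
    (items : List (String × List (String × String)))
    (found : PySem.Set String) : Option (PySem.Set String) :=
  match products with
  | [] => some found
  | p :: ps =>
    match csA_inner items (PySem.Str.lower ((PySem.Dict.ofList p).getD "title" "")) found with
    | some f => csA_loop ps items f
    | none => none

def count_species (products : List (List (String × String))) (species_lookup : List (String × List (String × String))) : Int :=
  match csA_loop products (PySem.Dict.ofList species_lookup).items PySem.Set.empty with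
  | some f => (f.length : Int)
  | none => 0

-- ===== PORT B =====
-- 'for term, entry in species_lookup.items(): …' over the remaining (still unmatched) titles
def csB_loop (items : List (String × List (String × String)))
    (remaining : List String) (found : PySem.Set String) : Option (PySem.Set String) :=
  match items with
  | [] => some found
  | (term, entry) :: rest =>
    if term == "" then csB_loop rest remaining found
    else
      let still := remaining.filter (fun t => !(PySem.Str.isIn term t))
      if still.length ≠ remaining.length then
        match (PySem.Dict.ofList entry).get? "cn" with
        | some cn => csB_loop rest still (PySem.Set.add found cn)
        | none => none
      else csB_loop rest still found

def count_species_alt (products : List (List (String × String))) (species_lookup : List (String × List (String × String))) : Int :=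
  let remaining := products.map (fun p => PySem.Str.lower ((PySem.Dict.ofList p).getD "title" ""))
  match csB_loop (PySem.Dict.ofList species_lookup).items remaining PySem.Set.empty with
  | some f => (f.length : Int)
  | none => 0

-- ===== PRECONDITION & SPEC =====
-- Pre_ excludes inputs where some nonempty term matching a product's lowered title has an
-- entry without key "cn": A raises KeyError there when such a term is the product's FIRST
-- matching term, and B raises likewise in term order; the few inputs where only a non-first
-- matcher lacks "cn" (A returns normally) are also excluded — see the cite.
def Pre_count_species (products : List (List (String × String))) (species_lookup : List (String × List (String × String))) : Prop :=
  ∀ p ∈ products, ∀ te ∈ (PySem.Dict.ofList species_lookup).items,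
    te.1 ≠ "" →
    PySem.Str.isIn te.1 (PySem.Str.lower ((PySem.Dict.ofList p).getD "title" "")) = true →
    (PySem.Dict.ofList te.2).contains "cn" = true
instance (products : List (List (String × String))) (species_lookup : List (String × List (String × String))) : Decidable (Pre_count_species products species_lookup) := by unfold Pre_count_species; infer_instance

def pvWitness_count_species : (List (List (String × String))) × (List (String × List (String × String))) :=
  ([[("title", "Red Oak tree")]], [("oak", [("cn", "Oak")]), ("pine", [("cn", "Pine")])])

def Spec_count_species (products : List (List (String × String))) (species_lookup : List (String × List (String × String))) (out : Int) : Prop := out = count_species_alt products species_lookup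
instance (products : List (List (String × String))) (species_lookup : List (String × List (String × String))) (out : Int) : Decidable (Spec_count_species products species_lookup out) := by unfold Spec_count_species; infer_instance

-- ===== CLAIM (what is proved, stated in full; the proofs are below) =====
def Claim_equal_count_species : Prop := ∀ (products : List (List (String × String))) (species_lookup : List (String × List (String × String))), Dom_count_species products species_lookup → Pre_count_species products species_lookup → Spec_count_species products species_lookup (count_species products species_lookup)

-- ===== LEMMAS AND PROOFS =====

-- lowered title of a product dict
def csTitle (p : List (String × String)) : String :=
  PySem.Str.lower ((PySem.Dict.ofList p).getD "title" "")

-- common name produced for title t by the item list I: "cn" of t's first matching term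
def csCn (I : List (String × List (String × String))) (t : String) : Option String :=
  (I.find? (fun te => !(te.1 == "") && PySem.Str.isIn te.1 t)).bind
    (fun te => (PySem.Dict.ofList te.2).get? "cn")

-- precondition relativised to an item list and a list of (already lowered) titles
def csPre (I : List (String × List (String × String))) (ts : List String) : Prop :=
  ∀ t ∈ ts, ∀ te ∈ I, te.1 ≠ "" → PySem.Str.isIn te.1 t = true →
    (PySem.Dict.ofList te.2).contains "cn" = true

theorem csA_inner_char (I : List (String × List (String × String))) (t : String)
    (found : PySem.Set String) (h : csPre I [t]) :
    csA_inner I t found = some ((csCn I t).elim found (PySem.Set.add found)) := by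
  induction I with
  | nil => simp [csA_inner, csCn]
  | cons te rest ih =>
    obtain ⟨term, entry⟩ := te
    by_cases hc : (!(term == "") && PySem.Str.isIn term t) = true
    · have hc' : term ≠ "" ∧ PySem.Str.isIn term t = true := by
        simpa using hc
      have hcn : (PySem.Dict.ofList entry).contains "cn" = true :=
        h t (by simp) (term, entry) (by simp) hc'.1 hc'.2
      obtain ⟨cn, hg⟩ : ∃ cn, (PySem.Dict.ofList entry).get? "cn" = some cn := by
        rw [PySem.Dict.contains_eq_isSome_get?] at hcn
        exact Option.isSome_iff_exists.mp hcn
      have hfind : List.find? (fun te => !(te.1 == "") && PySem.Str.isIn te.1 t)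
          ((term, entry) :: rest) = some (term, entry) := by
        rw [List.find?_cons_of_pos]; exact hc
      simp only [csCn, hfind, Option.bind_some, hg, Option.elim_some]
      simp only [csA_inner]
      rw [if_pos hc, hg]
    · have hrest : csPre rest [t] := by
        intro t' ht' te hte
        exact h t' ht' te (List.mem_cons_of_mem _ hte)
      have hcf : (!(term == "") && PySem.Chars.isIn term.toList t.toList) = false := by
        revert hc; cases hb : (!(term == "") && PySem.Str.isIn term t) <;>
          simp_all [PySem.Str.isIn]
      have hfind : csCn ((term, entry) :: rest) t = csCn rest t := by
        simp [csCn, hcf]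
      rw [hfind]
      rw [show csA_inner ((term, entry) :: rest) t found = csA_inner rest t found from by
        simp only [csA_inner]; rw [if_neg hc]]
      exact ih hrest

theorem csA_loop_char (I : List (String × List (String × String)))
    (ps : List (List (String × String))) (found : PySem.Set String)
    (hnd : found.Nodup) (h : csPre I (ps.map csTitle)) :
    ∃ F, csA_loop ps I found = some F ∧ F.Nodup ∧
      (∀ x, x ∈ F ↔ x ∈ found ∨ ∃ p ∈ ps, csCn I (csTitle p) = some x) := by
  induction ps generalizing found with
  | nil => exact ⟨found, rfl, hnd, by simp⟩
  | cons p ps ih =>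
    have hhd : csPre I [csTitle p] := by
      intro t ht te hte
      simp only [List.mem_singleton] at ht
      subst ht
      exact h (csTitle p) (List.mem_cons_self) te hte
    have htl : csPre I (ps.map csTitle) := fun t ht te hte =>
      h t (List.mem_cons_of_mem _ ht) te hte
    have hstep : csA_loop (p :: ps) I found =
        match csA_inner I (csTitle p) found with
        | some f => csA_loop ps I f
        | none => none := rfl
    rw [hstep, csA_inner_char I (csTitle p) found hhd]
    cases hcn : csCn I (csTitle p) with
    | none =>
      obtain ⟨F, hF, hFnd, hFm⟩ := ih found hnd htl
      refine ⟨F, by simpa using hF, hFnd, fun x => ?_⟩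
      rw [hFm x]
      constructor
      · rintro (hx | ⟨q, hq, hcq⟩)
        · exact Or.inl hx
        · exact Or.inr ⟨q, List.mem_cons_of_mem _ hq, hcq⟩
      · rintro (hx | ⟨q, hq, hcq⟩)
        · exact Or.inl hx
        · rcases List.mem_cons.mp hq with rfl | hq
          · rw [hcn] at hcq; cases hcq
          · exact Or.inr ⟨q, hq, hcq⟩
    | some cn =>
      obtain ⟨F, hF, hFnd, hFm⟩ := ih (PySem.Set.add found cn) (PySem.Set.nodup_add found _ hnd) htl
      refine ⟨F, by simpa using hF, hFnd, fun x => ?_⟩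
      rw [hFm x, PySem.Set.mem_add]
      constructor
      · rintro ((hx | rfl) | ⟨q, hq, hcq⟩)
        · exact Or.inl hx
        · exact Or.inr ⟨p, List.mem_cons_self, hcn⟩
        · exact Or.inr ⟨q, List.mem_cons_of_mem _ hq, hcq⟩
      · rintro (hx | ⟨q, hq, hcq⟩)
        · exact Or.inl (Or.inl hx)
        · rcases List.mem_cons.mp hq with rfl | hq
          · rw [hcn] at hcq
            exact Or.inl (Or.inr (Option.some_injective _ hcq).symm)
          · exact Or.inr ⟨q, hq, hcq⟩

theorem csB_loop_char (I : List (String × List (String × String)))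
    (R : List String) (found : PySem.Set String)
    (hnd : found.Nodup) (h : csPre I R) :
    ∃ F, csB_loop I R found = some F ∧ F.Nodup ∧
      (∀ x, x ∈ F ↔ x ∈ found ∨ ∃ t ∈ R, csCn I t = some x) := by
  induction I generalizing R found with
  | nil => exact ⟨found, rfl, hnd, by simp [csCn]⟩
  | cons te rest ih =>
    obtain ⟨term, entry⟩ := te
    have htl : csPre rest R := fun t ht te' hte' =>
      h t ht te' (List.mem_cons_of_mem _ hte')
    by_cases he : term = ""
    · subst he
      have hskip : ∀ t, csCn (("", entry) :: rest) t = csCn rest t := by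
        intro t; simp [csCn]
      have hstep : csB_loop (("", entry) :: rest) R found = csB_loop rest R found := by
        simp [csB_loop]
      rw [hstep]
      obtain ⟨F, hF, hFnd, hFm⟩ := ih R found hnd htl
      exact ⟨F, hF, hFnd, fun x => by simp only [hFm x, hskip]⟩
    · have heb : (term == "") = false := by simpa using he
      -- the head term matches title t iff its Bool guard fires
      have hhead : ∀ t, PySem.Str.isIn term t = true →
          csCn ((term, entry) :: rest) t = (PySem.Dict.ofList entry).get? "cn" := by
        intro t hm
        have : List.find? (fun te => !(te.1 == "") && PySem.Str.isIn te.1 t)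
            ((term, entry) :: rest) = some (term, entry) := by
          rw [List.find?_cons_of_pos]
          simp [heb]
          exact hm
        unfold csCn
        rw [this]
        rfl
      have hskip : ∀ t, PySem.Str.isIn term t = false →
          csCn ((term, entry) :: rest) t = csCn rest t := by
        intro t hm
        have hmc : PySem.Chars.isIn term.toList t.toList = false := by
          simpa [PySem.Str.isIn] using hm
        simp [csCn, hmc]
      by_cases hlen : (R.filter (fun t => !(PySem.Str.isIn term t))).length ≠ R.length
      · -- some remaining title matched: entry["cn"] is read
        have hex : ∃ t0 ∈ R, PySem.Str.isIn term t0 = true := by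
          have hlt : (R.filter (fun t => !(PySem.Str.isIn term t))).length < R.length :=
            lt_of_le_of_ne (List.length_filter_le _ _) hlen
          obtain ⟨t0, ht0, hp⟩ := List.length_filter_lt_length_iff_exists.mp hlt
          exact ⟨t0, ht0, by simp at hp; exact hp⟩
        obtain ⟨t0, ht0, hm0⟩ := hex
        have hcn : (PySem.Dict.ofList entry).contains "cn" = true :=
          h t0 ht0 (term, entry) List.mem_cons_self he hm0
        obtain ⟨cn, hg⟩ : ∃ cn, (PySem.Dict.ofList entry).get? "cn" = some cn := by
          rw [PySem.Dict.contains_eq_isSome_get?] at hcn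
          exact Option.isSome_iff_exists.mp hcn
        have hstep : csB_loop ((term, entry) :: rest) R found =
            csB_loop rest (R.filter (fun t => !(PySem.Str.isIn term t)))
              (PySem.Set.add found cn) := by
          simp only [csB_loop, heb, Bool.false_eq_true, if_false, hg]
          rw [if_pos hlen]
        have hpre' : csPre rest (R.filter (fun t => !(PySem.Str.isIn term t))) :=
          fun t ht te' hte' => htl t (List.mem_of_mem_filter ht) te' hte'
        obtain ⟨F, hF, hFnd, hFm⟩ :=
          ih (R.filter (fun t => !(PySem.Str.isIn term t)))
            (PySem.Set.add found cn) (PySem.Set.nodup_add found _ hnd) hpre'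
        rw [hstep]
        refine ⟨F, hF, hFnd, fun x => ?_⟩
        rw [hFm x, PySem.Set.mem_add]
        constructor
        · rintro ((hx | rfl) | ⟨q, hq, hcq⟩)
          · exact Or.inl hx
          · exact Or.inr ⟨t0, ht0, by rw [hhead t0 hm0, hg]⟩
          · refine Or.inr ⟨q, List.mem_of_mem_filter hq, ?_⟩
            have hqm : PySem.Str.isIn term q = false := by
              have := (List.mem_filter.mp hq).2
              simpa using this
            rw [hskip q hqm]; exact hcq
        · rintro (hx | ⟨q, hq, hcq⟩)
          · exact Or.inl (Or.inl hx)
          · by_cases hqm : PySem.Str.isIn term q = true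
            · rw [hhead q hqm, hg] at hcq
              exact Or.inl (Or.inr (Option.some_injective _ hcq).symm)
            · have hqm' : PySem.Str.isIn term q = false := by
                simpa using hqm
              refine Or.inr ⟨q, List.mem_filter.mpr ⟨hq, by simpa [PySem.Str.isIn] using hqm'⟩, ?_⟩
              rw [← hskip q hqm']; exact hcq
      · -- no remaining title matched: the filter keeps everything
        have hR : R.filter (fun t => !(PySem.Str.isIn term t)) = R :=
          List.Sublist.eq_of_length List.filter_sublist (by omega)
        have hall : ∀ t ∈ R, PySem.Str.isIn term t = false := by
          intro t ht
          have := List.filter_eq_self.mp hR t ht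
          simp at this
          exact this
        have hstep : csB_loop ((term, entry) :: rest) R found = csB_loop rest R found := by
          simp only [csB_loop, heb, Bool.false_eq_true, if_false, hR]
          rw [if_neg (by simp)]
        rw [hstep]
        obtain ⟨F, hF, hFnd, hFm⟩ := ih R found hnd htl
        refine ⟨F, hF, hFnd, fun x => ?_⟩
        rw [hFm x]
        constructor
        · rintro (hx | ⟨q, hq, hcq⟩)
          · exact Or.inl hx
          · exact Or.inr ⟨q, hq, by rw [hskip q (hall q hq)]; exact hcq⟩
        · rintro (hx | ⟨q, hq, hcq⟩)
          · exact Or.inl hx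
          · rw [hskip q (hall q hq)] at hcq
            exact Or.inr ⟨q, hq, hcq⟩

-- ===== VERDICT (by name: the statement is the Claim_ definition above) =====
theorem count_species_spec : Claim_equal_count_species := by
  intro products species_lookup _hD hP
  unfold Spec_count_species count_species count_species_alt
  set I := (PySem.Dict.ofList species_lookup).items with hI
  have hPre : csPre I (products.map csTitle) := by
    intro t ht te hte h1 h2
    rcases List.mem_map.mp ht with ⟨p, hp, rfl⟩
    exact hP p hp te hte h1 h2
  obtain ⟨FA, hFA, hFAnd, hFAm⟩ := csA_loop_char I products PySem.Set.empty List.nodup_nil hPre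
  obtain ⟨FB, hFB, hFBnd, hFBm⟩ := csB_loop_char I (products.map csTitle) PySem.Set.empty List.nodup_nil hPre
  have hsame : ∀ x, x ∈ FA ↔ x ∈ FB := by
    intro x
    rw [hFAm x, hFBm x]
    constructor
    · rintro (hx | ⟨p, hp, hcn⟩)
      · exact Or.inl hx
      · exact Or.inr ⟨csTitle p, List.mem_map.mpr ⟨p, hp, rfl⟩, hcn⟩
    · rintro (hx | ⟨t, ht, hcn⟩)
      · exact Or.inl hx
      · rcases List.mem_map.mp ht with ⟨p, hp, rfl⟩
        exact Or.inr ⟨p, hp, hcn⟩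
  have hperm : FA.Perm FB := (List.perm_ext_iff_of_nodup hFAnd hFBnd).mpr hsame
  have hloopA : csA_loop products I PySem.Set.empty = some FA := hFA
  have hloopB :
      csB_loop I (products.map (fun p => PySem.Str.lower ((PySem.Dict.ofList p).getD "title" ""))) PySem.Set.empty = some FB := hFB
  simp only [hloopA, hloopB]
  exact_mod_cast hperm.length_eq
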